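-- pv_equiv track=rewrite | github.com/gauravsb/named-entity-recognition | temp-memm-1.py | convertToSubmissionOutput
-- ===== SOURCE A (Python) =====
-- from collections import defaultdict
--
-- def convertToSubmissionOutput(predicted_tags):
--     resultMap = defaultdict(list)
--     i = 0
--     while (i < len(predicted_tags)):
--         # print (predicted_tags[i][0])
--         if predicted_tags[i][0] == "O":
--             i += 1
--             continue
--         tag = predicted_tags[i][0]
--         startIndex = i
--         while (i + 1 < len(predicted_tags) and predicted_tags[i + 1][0] == predicted_tags[i][0]):
--             i += 1
--         endIndex = i
--         resultMap[tag].append((startIndex, endIndex))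
--         i += 1
--     return resultMap
-- ===== SOURCE B (Python) =====
-- from collections import defaultdict
--
-- def convertToSubmissionOutput(predicted_tags):
--     resultMap = defaultdict(list)
--     tags = [t for t, _ in predicted_tags]
--     if not tags:
--         return resultMap
--     n = len(tags)
--     # staged: first materialise every cut point (index where a new run begins),
--     # then pair consecutive cut points into intervals
--     cuts = [0] + [i for i in range(1, n) if tags[i] != tags[i - 1]] + [n]
--     for s, e in zip(cuts, cuts[1:]):
--         if tags[s] != "O":
--             resultMap[tags[s]].append((s, e - 1))
--     return resultMap
-- ===== Notes on version B (the rewrite author's own statement) =====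
-- stated objective: alternative
-- what changed: Instead of scanning runs with nested while-loops, B works in two stages: it materialises the list of cut points (indices where the tag changes) with a range comprehension, then zips consecutive cut points into intervals and files the non-'O' ones.
import Mathlib
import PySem

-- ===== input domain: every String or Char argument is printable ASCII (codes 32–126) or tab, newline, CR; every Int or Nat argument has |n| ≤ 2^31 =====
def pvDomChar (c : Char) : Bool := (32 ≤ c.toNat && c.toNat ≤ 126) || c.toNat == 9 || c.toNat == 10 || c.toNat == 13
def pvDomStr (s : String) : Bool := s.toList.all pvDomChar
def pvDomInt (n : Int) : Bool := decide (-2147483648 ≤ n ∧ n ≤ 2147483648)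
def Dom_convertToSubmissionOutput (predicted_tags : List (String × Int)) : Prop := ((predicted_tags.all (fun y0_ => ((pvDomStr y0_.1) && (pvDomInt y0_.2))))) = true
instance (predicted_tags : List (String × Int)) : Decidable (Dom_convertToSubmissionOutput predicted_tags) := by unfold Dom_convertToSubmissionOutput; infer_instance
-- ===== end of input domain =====

-- B replaces A's nested while-loop run scanner by a staged algorithm: first
-- materialise the list of cut points (run starts), then zip consecutive cut
-- points into intervals; same O(n) cost, a different decomposition.

-- ===== PORT A =====
-- inner while: advance i while the next tag equals the current one; returns final i
def pvARun (xs : List (String × Int)) (i : Nat) : Nat :=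
  if h : i + 1 < xs.length ∧ (xs.getD (i + 1) ("", 0)).1 = (xs.getD i ("", 0)).1 then
    pvARun xs (i + 1)
  else i
termination_by xs.length - i
decreasing_by omega

-- termination fact for the outer loop: the inner while never moves i backwards
theorem pvARun_ge (xs : List (String × Int)) (i : Nat) : i ≤ pvARun xs i := by
  fun_induction pvARun xs i with
  | case1 i h ih => omega
  | case2 i h => omega

-- outer while over index i, threading resultMap
def pvALoop (xs : List (String × Int)) (i : Nat)
    (d : PySem.Dict String (List (Int × Int))) : PySem.Dict String (List (Int × Int)) :=
  if _h : i < xs.length then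
    if (xs.getD i ("", 0)).1 = "O" then
      pvALoop xs (i + 1) d
    else
      let tag := (xs.getD i ("", 0)).1
      let startIndex := i
      let endIndex := pvARun xs i
      pvALoop xs (endIndex + 1)
        (d.modify tag [] (fun l => l ++ [((startIndex : Int), (endIndex : Int))]))
  else d
termination_by xs.length - i
decreasing_by
  · omega
  · have := pvARun_ge xs i; omega

def convertToSubmissionOutput (predicted_tags : List (String × Int)) : List (String × List (Int × Int)) :=
  (pvALoop predicted_tags 0 PySem.Dict.empty).items

-- ===== PORT B =====
-- the comprehension's condition: index i starts a new run (tags[i] != tags[i-1])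
def pvPred (tags : List String) (i : Int) : Bool :=
  decide (PySem.List.pyGetD tags i "" ≠ PySem.List.pyGetD tags (i - 1) "")

-- cuts = [0] + [i for i in range(1, n) if tags[i] != tags[i-1]] + [n]
def pvCuts (tags : List String) : List Int :=
  [0] ++ (PySem.List.pyRange 1 (tags.length : Int) 1).filter (pvPred tags) ++ [(tags.length : Int)]

-- body of B's for-loop over zip(cuts, cuts[1:])
def pvBStep (tags : List String) (d : PySem.Dict String (List (Int × Int)))
    (p : Int × Int) : PySem.Dict String (List (Int × Int)) :=
  if PySem.List.pyGetD tags p.1 "" ≠ "O" then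
    d.modify (PySem.List.pyGetD tags p.1 "") [] (fun l => l ++ [(p.1, p.2 - 1)])
  else d

def convertToSubmissionOutput_alt (predicted_tags : List (String × Int)) : List (String × List (Int × Int)) :=
  let tags := predicted_tags.map Prod.fst
  if tags = [] then (PySem.Dict.empty : PySem.Dict String (List (Int × Int))).items
  else
    let cuts := pvCuts tags
    ((cuts.zip cuts.tail).foldl (pvBStep tags) PySem.Dict.empty).items

-- ===== PRECONDITION & SPEC =====
def Spec_convertToSubmissionOutput (predicted_tags : List (String × Int)) (out : List (String × List (Int × Int))) : Prop := out = convertToSubmissionOutput_alt predicted_tags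
instance (predicted_tags : List (String × Int)) (out : List (String × List (Int × Int))) : Decidable (Spec_convertToSubmissionOutput predicted_tags out) := by unfold Spec_convertToSubmissionOutput; infer_instance

-- ===== CLAIM =====
def Claim_equal_convertToSubmissionOutput : Prop := ∀ (predicted_tags : List (String × Int)), Dom_convertToSubmissionOutput predicted_tags → Spec_convertToSubmissionOutput predicted_tags (convertToSubmissionOutput predicted_tags)

-- ===== LEMMAS AND PROOFS =====

-- the tag A reads at index i
def pvTag (xs : List (String × Int)) (i : Nat) : String := (xs.getD i ("", 0)).1

theorem pvTag_eq (xs : List (String × Int)) (i : Nat) :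
    pvTag xs i = (xs.map Prod.fst).getD i "" := by
  simp [pvTag, List.getD]
  cases xs[i]? <;> simp

-- the inner while stays inside the list
theorem pvARun_lt (xs : List (String × Int)) (i : Nat) (h : i < xs.length) :
    pvARun xs i < xs.length := by
  fun_induction pvARun xs i with
  | case1 i h' ih => exact ih h'.1
  | case2 i h' => exact h

-- pvPred at a successor index, phrased through pvTag
theorem pvPred_natSucc (xs : List (String × Int)) (j : Nat) :
    pvPred (xs.map Prod.fst) ((j + 1 : Nat) : Int) = decide (pvTag xs (j + 1) ≠ pvTag xs j) := by
  unfold pvPred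
  have h1 : ((j + 1 : Nat) : Int) - 1 = ((j : Nat) : Int) := by push_cast; ring
  rw [h1, PySem.List.pyGetD_natCast, PySem.List.pyGetD_natCast, ← pvTag_eq, ← pvTag_eq]

-- the bounds list B builds, started after index i
def pvBounds (xs : List (String × Int)) (i : Nat) : List Int :=
  (PySem.List.pyRange ((i : Int) + 1) (xs.length : Int) 1).filter (pvPred (xs.map Prod.fst))
    ++ [(xs.length : Int)]

-- the dict after closing one run with tag `tag`, start s, end e
def pvNewD (d : PySem.Dict String (List (Int × Int))) (tag : String) (s : Int) (e : Nat) :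
    PySem.Dict String (List (Int × Int)) :=
  if tag = "O" then d else d.modify tag [] (fun l => l ++ [(s, (e : Int))])

-- the cut following index i is the one right after A's inner while stops
theorem pvBounds_run (xs : List (String × Int)) (i : Nat) :
    i < xs.length →
    pvBounds xs i =
      ((pvARun xs i + 1 : Nat) : Int) ::
        (if pvARun xs i + 1 < xs.length then pvBounds xs (pvARun xs i + 1) else []) := by
  fun_induction pvARun xs i with
  | case1 i h ih =>
      intro hi
      have hcons : PySem.List.pyRange ((i : Int) + 1) (xs.length : Int) 1
          = ((i : Int) + 1) :: PySem.List.pyRange ((i : Int) + 1 + 1) (xs.length : Int) 1 :=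
        PySem.List.pyRange_one_cons (by exact_mod_cast h.1)
      have hcast : ((i : Int) + 1) = ((i + 1 : Nat) : Int) := by push_cast; ring
      have hfalse : pvPred (xs.map Prod.fst) ((i + 1 : Nat) : Int) = false := by
        rw [pvPred_natSucc]; simpa [pvTag] using h.2
      unfold pvBounds
      rw [hcons, List.filter_cons, hcast, hfalse]
      simp only [Bool.false_eq_true, if_false]
      have hih := ih h.1
      unfold pvBounds at hih
      exact hih
  | case2 i h =>
      intro hi
      by_cases h1 : i + 1 < xs.length
      · have hne : pvTag xs (i + 1) ≠ pvTag xs i := fun hc => h ⟨h1, hc⟩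
        have hcons : PySem.List.pyRange ((i : Int) + 1) (xs.length : Int) 1
            = ((i : Int) + 1) :: PySem.List.pyRange ((i : Int) + 1 + 1) (xs.length : Int) 1 :=
          PySem.List.pyRange_one_cons (by exact_mod_cast h1)
        have hcast : ((i : Int) + 1) = ((i + 1 : Nat) : Int) := by push_cast; ring
        have htrue : pvPred (xs.map Prod.fst) ((i + 1 : Nat) : Int) = true := by
          rw [pvPred_natSucc]; simpa using hne
        unfold pvBounds
        rw [hcons, List.filter_cons, hcast, htrue, if_pos rfl, if_pos h1]
        simp [List.cons_append]
      · have hn : i + 1 = xs.length := by omega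
        unfold pvBounds
        rw [PySem.List.pyRange_one_eq_nil (by omega : (xs.length : Int) ≤ (i : Int) + 1),
          if_neg h1, List.filter_nil]
        simp [hn]

-- A walks through a run of "O"s one index at a time, leaving d unchanged
theorem pvA_O_run (xs : List (String × Int)) (i : Nat) :
    ∀ (d : PySem.Dict String (List (Int × Int))), pvTag xs i = "O" → i < xs.length →
      pvALoop xs i d = pvALoop xs (pvARun xs i + 1) d := by
  fun_induction pvARun xs i with
  | case1 i h ih =>
      intro d hO hi
      rw [pvALoop, dif_pos hi, if_pos (show (xs.getD i ("", 0)).1 = "O" from hO)]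
      exact ih d (h.2.trans hO) h.1
  | case2 i h =>
      intro d hO hi
      rw [pvALoop, dif_pos hi, if_pos (show (xs.getD i ("", 0)).1 = "O" from hO)]

-- A processes one whole run (tag "O" or not) and lands at pvARun + 1
theorem pvA_step (xs : List (String × Int)) (i : Nat) (d : PySem.Dict String (List (Int × Int)))
    (hi : i < xs.length) :
    pvALoop xs i d = pvALoop xs (pvARun xs i + 1) (pvNewD d (pvTag xs i) (i : Int) (pvARun xs i)) := by
  by_cases hO : pvTag xs i = "O"
  · rw [pvNewD, if_pos hO]
    exact pvA_O_run xs i d hO hi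
  · rw [pvALoop, dif_pos hi, if_neg (by simpa [pvTag] using hO), pvNewD, if_neg hO]
    rfl

-- B's step on the pair (i, e+1) closes exactly A's run
theorem pvB_step_eq (xs : List (String × Int)) (i e : Nat) (d : PySem.Dict String (List (Int × Int))) :
    pvBStep (xs.map Prod.fst) d ((i : Int), ((e + 1 : Nat) : Int)) = pvNewD d (pvTag xs i) (i : Int) e := by
  have htag : PySem.List.pyGetD (xs.map Prod.fst) ((i : Nat) : Int) "" = pvTag xs i := by
    rw [PySem.List.pyGetD_natCast, ← pvTag_eq]
  have hc : ((e + 1 : Nat) : Int) - 1 = ((e : Nat) : Int) := by push_cast; ring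
  unfold pvBStep pvNewD
  simp only [htag, hc]
  by_cases hO : pvTag xs i = "O" <;> simp [hO]

-- main invariant: A from index i equals B's pair-fold over the bounds from i
theorem pvMain (xs : List (String × Int)) :
    ∀ (k i : Nat) (d : PySem.Dict String (List (Int × Int))), xs.length - i ≤ k → i < xs.length →
      pvALoop xs i d =
        ((((i : Int) :: pvBounds xs i).zip (pvBounds xs i)).foldl (pvBStep (xs.map Prod.fst)) d) := by
  intro k
  induction k with
  | zero => intro i d hk hi; omega
  | succ k ih =>
      intro i d hk hi
      have he := pvARun_ge xs i
      have hel := pvARun_lt xs i hi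
      rw [pvA_step xs i d hi, pvBounds_run xs i hi]
      by_cases h1 : pvARun xs i + 1 < xs.length
      · rw [if_pos h1]
        have hzip : (((i : Int) :: ((pvARun xs i + 1 : Nat) : Int) :: pvBounds xs (pvARun xs i + 1)).zip
              (((pvARun xs i + 1 : Nat) : Int) :: pvBounds xs (pvARun xs i + 1)))
            = ((i : Int), ((pvARun xs i + 1 : Nat) : Int)) ::
              ((((pvARun xs i + 1 : Nat) : Int) :: pvBounds xs (pvARun xs i + 1)).zip
                (pvBounds xs (pvARun xs i + 1))) := by
          cases hb : pvBounds xs (pvARun xs i + 1) <;> simp [List.zip]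
        rw [hzip, List.foldl_cons, pvB_step_eq]
        exact ih (pvARun xs i + 1) _ (by omega) h1
      · rw [if_neg h1]
        have hend : pvARun xs i + 1 = xs.length := by omega
        simp only [List.zip, List.zipWith, List.foldl_cons, List.foldl_nil]
        rw [pvB_step_eq]
        rw [pvALoop, dif_neg (by omega)]

-- ===== VERDICT =====
theorem convertToSubmissionOutput_spec : Claim_equal_convertToSubmissionOutput := by
  intro xs _
  unfold Spec_convertToSubmissionOutput convertToSubmissionOutput convertToSubmissionOutput_alt
  by_cases hnil : xs = []
  · subst hnil
    rw [pvALoop]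
    simp
  · have hne : xs.map Prod.fst ≠ [] := by simpa using hnil
    rw [if_neg hne]
    have hlen : 0 < xs.length := List.length_pos_iff.mpr hnil
    have hcuts : pvCuts (xs.map Prod.fst) = (0 : Int) :: pvBounds xs 0 := by
      unfold pvCuts pvBounds
      simp
    simp only [hcuts, List.tail_cons]
    rw [pvMain xs xs.length 0 PySem.Dict.empty (by omega) hlen]
    norm_num
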